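-- pv_equiv track=rewrite | github.com/myria75/QuantumWave | src/business/controller/QCPDTool-main/QCPDTool/QCPDWeb/src/finder_par.py | get_hsets
-- ===== SOURCE A (Python) =====
-- def get_hsets(circuit):
--     '''Return a list of Hadamard groups as a list of tuples (qubit, column)'''
--     non_cancelled = []
--     for i, qubit in enumerate(circuit):
--         h_cols = [col for col, gate in enumerate(qubit) if gate == 'H']
--         for j, h_col in enumerate(h_cols):
--             if j % 2 == 0: # Not cancelled
--                 if j / 2 <= len(non_cancelled) - 1: # Exists data structure
--                     non_cancelled[int(j / 2)].append((i,h_col))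
--                 else:
--                     non_cancelled.append([(i,h_col)])
--     return non_cancelled
-- ===== SOURCE B (Python) =====
-- def get_hsets(circuit):
--     '''Return a list of Hadamard groups as a list of tuples (qubit, column)'''
--     per_qubit = [[(i, col) for col, gate in enumerate(qubit) if gate == 'H'][::2]
--                  for i, qubit in enumerate(circuit)]
--     depth = max((len(row) for row in per_qubit), default=0)
--     return [[row[k] for row in per_qubit if k < len(row)] for k in range(depth)]
-- ===== Notes on version B (the rewrite author's own statement) =====
-- stated objective: alternative
-- what changed: Instead of growing the group list incrementally with index-tested append/modify inside a doubly nested loop, B builds each qubit's even-indexed Hadamard list with a [::2] slice and then transposes the ragged per-qubit structure column by column.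
import Mathlib
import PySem

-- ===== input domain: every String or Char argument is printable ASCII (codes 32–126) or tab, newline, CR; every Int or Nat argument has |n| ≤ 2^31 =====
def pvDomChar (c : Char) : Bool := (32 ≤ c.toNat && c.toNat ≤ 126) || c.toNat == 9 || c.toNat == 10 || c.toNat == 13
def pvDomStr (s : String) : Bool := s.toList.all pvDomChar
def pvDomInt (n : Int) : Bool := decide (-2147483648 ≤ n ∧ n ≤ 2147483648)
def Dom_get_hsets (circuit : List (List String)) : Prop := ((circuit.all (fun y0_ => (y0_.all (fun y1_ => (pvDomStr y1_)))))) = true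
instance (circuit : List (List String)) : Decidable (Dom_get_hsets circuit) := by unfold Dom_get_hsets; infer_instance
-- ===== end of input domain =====

-- B groups non-cancelled Hadamards by transposing per-qubit even-Hadamard lists instead of
-- growing the group list in place inside A's nested loop; objective: alternative decomposition.

-- ===== PORT A =====
-- loop body of A's inner 'for j, h_col in enumerate(h_cols)' loop, as a named helper
def innerStepA (i : Int) (nc : List (List (Int × Int))) (jh : Int × Int) : List (List (Int × Int)) :=
  if PySem.Int.mod jh.1 2 == 0 then      -- j % 2 == 0
    -- here j ≥ 0 (enumerate index) and even, so Python's 'j / 2' and 'int(j / 2)' are exactly j // 2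
    if PySem.Int.floordiv jh.1 2 ≤ (nc.length : Int) - 1 then
      nc.modify (PySem.Int.floordiv jh.1 2).toNat (fun g => g ++ [(i, jh.2)])
    else
      nc ++ [[(i, jh.2)]]
  else nc

def get_hsets (circuit : List (List String)) : List (List (Int × Int)) :=
  (PySem.List.enumerate circuit).foldl (fun non_cancelled iq =>
    let h_cols : List Int :=
      ((PySem.List.enumerate iq.2).filter (fun cg => cg.2 == "H")).map (fun cg => cg.1)
    (PySem.List.enumerate h_cols).foldl (innerStepA iq.1) non_cancelled) []

-- ===== PORT B =====
def get_hsets_alt (circuit : List (List String)) : List (List (Int × Int)) :=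
  let per_qubit : List (List (Int × Int)) :=
    (PySem.List.enumerate circuit).map (fun iq =>
      -- [(i, col) for col, gate in enumerate(qubit) if gate == 'H'][::2]; step 2 ≠ 0, so slice? is some
      (PySem.List.slice? (((PySem.List.enumerate iq.2).filter (fun cg => cg.2 == "H")).map
        (fun cg => (iq.1, cg.1))) none none 2).getD [])
  let depth : Int := PySem.List.maxD (per_qubit.map (fun row => (row.length : Int))) id 0
  (PySem.List.pyRange 0 depth 1).map (fun k =>
    -- [row[k] for row in per_qubit if k < len(row)]; the guard makes row[k] in range, default unread
    (per_qubit.filter (fun row => decide (k < (row.length : Int)))).map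
      (fun row => PySem.List.pyGetD row k (0, 0)))

-- ===== PRECONDITION & SPEC =====
def Spec_get_hsets (circuit : List (List String)) (out : List (List (Int × Int))) : Prop := out = get_hsets_alt circuit
instance (circuit : List (List String)) (out : List (List (Int × Int))) : Decidable (Spec_get_hsets circuit out) := by unfold Spec_get_hsets; infer_instance

-- ===== CLAIM (what is proved, stated in full; the proofs are below) =====
def Claim_equal_get_hsets : Prop := ∀ (circuit : List (List String)), Dom_get_hsets circuit → Spec_get_hsets circuit (get_hsets circuit)

-- ===== LEMMAS AND PROOFS =====

-- every second element of a list, starting with the first (what '[::2]' keeps)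
def evens {α : Type} : List α → List α
  | [] => []
  | [a] => [a]
  | a :: _ :: t => a :: evens t

-- zip one row into the accumulated groups: element t of the row is appended to group t
def mergeG {α : Type} : List (List α) → List α → List (List α)
  | acc, [] => acc
  | [], p :: ps => [p] :: mergeG [] ps
  | g :: gs, p :: ps => (g ++ [p]) :: mergeG gs ps

-- the even-indexed Hadamard positions of qubit i
def hrow (i : Int) (q : List String) : List (Int × Int) :=
  evens (((PySem.List.enumerate q).filter (fun cg => cg.2 == "H")).map (fun cg => (i, cg.1)))

theorem innerStepA_shift_cons (i : Int) (c : Int) (j : Int) (hj : 0 ≤ j)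
    (g : List (Int × Int)) (gs : List (List (Int × Int))) :
    innerStepA i (g :: gs) (j + 2, c) = g :: innerStepA i gs (j, c) := by
  have hm : PySem.Int.mod (j + 2) 2 = PySem.Int.mod j 2 := by
    rw [PySem.Int.mod_eq_emod_of_pos (by omega : (0:Int) < 2),
        PySem.Int.mod_eq_emod_of_pos (by omega : (0:Int) < 2)]
    omega
  have hfd : PySem.Int.floordiv j 2 = j / 2 := PySem.Int.floordiv_eq_ediv_of_pos (by omega)
  have hd : PySem.Int.floordiv (j + 2) 2 = j / 2 + 1 := by
    rw [PySem.Int.floordiv_eq_ediv_of_pos (by omega : (0:Int) < 2)]; omega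
  simp only [innerStepA, hm, hfd, hd]
  by_cases hb : (PySem.Int.mod j 2 == 0)
  · rw [if_pos hb, if_pos hb]
    by_cases hc : j / 2 ≤ (gs.length : Int) - 1
    · rw [if_pos (by simp only [List.length_cons]; push_cast; omega), if_pos hc,
          show (j / 2 + 1).toNat = (j / 2).toNat + 1 by omega, List.modify_succ_cons]
    · rw [if_neg (by simp only [List.length_cons]; push_cast; omega), if_neg hc, List.cons_append]
  · rw [if_neg hb, if_neg hb]

theorem innerA_shift (i : Int) (l : List Int) (s : Int) (hs : 0 ≤ s)
    (g : List (Int × Int)) (gs : List (List (Int × Int))) :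
    (PySem.List.enumerate l (s + 2)).foldl (innerStepA i) (g :: gs)
      = g :: (PySem.List.enumerate l s).foldl (innerStepA i) gs := by
  induction l generalizing s g gs with
  | nil => simp [PySem.List.enumerate]
  | cons c t ih =>
    rw [PySem.List.enumerate_cons, PySem.List.enumerate_cons, List.foldl_cons, List.foldl_cons,
        innerStepA_shift_cons i c s hs g gs,
        show s + 2 + 1 = (s + 1) + 2 by ring]
    exact ih (s + 1) (by omega) g _

theorem innerA_eval (i : Int) (l : List Int) (nc : List (List (Int × Int))) :
    (PySem.List.enumerate l 0).foldl (innerStepA i) nc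
      = mergeG nc (evens (l.map (fun c => (i, c)))) := by
  induction l using evens.induct generalizing nc with
  | case1 => simp [PySem.List.enumerate, evens, mergeG]
  | case2 a =>
    rw [PySem.List.enumerate_cons]
    simp only [PySem.List.enumerate_nil, List.foldl_cons, List.foldl_nil, List.map_cons,
      List.map_nil, evens]
    cases nc with
    | nil =>
      simp [innerStepA, mergeG]
    | cons g gs =>
      have hc : PySem.Int.floordiv 0 2 ≤ (((g :: gs).length : Int)) - 1 := by
        rw [show PySem.Int.floordiv 0 2 = 0 by decide]
        simp only [List.length_cons]; push_cast; omega
      simp [innerStepA, List.modify_zero_cons, mergeG]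
  | case3 a b t ih =>
    rw [PySem.List.enumerate_cons, PySem.List.enumerate_cons, List.foldl_cons, List.foldl_cons]
    simp only [zero_add]
    have h2 : ∀ m, innerStepA i m (1, b) = m := by
      intro m; simp [innerStepA]
    cases nc with
    | nil =>
      have h1 : innerStepA i [] (0, a) = [[(i, a)]] := by
        simp [innerStepA]
      rw [h1, h2, show (1:Int) + 1 = 0 + 2 by ring, innerA_shift i t 0 le_rfl]
      simp [evens, mergeG, ih]
    | cons g gs =>
      have hc : PySem.Int.floordiv 0 2 ≤ (((g :: gs).length : Int)) - 1 := by
        rw [show PySem.Int.floordiv 0 2 = 0 by decide]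
        simp only [List.length_cons]; push_cast; omega
      have h1 : innerStepA i (g :: gs) (0, a) = (g ++ [(i, a)]) :: gs := by
        simp [innerStepA, List.modify_zero_cons]
      rw [h1, h2, show (1:Int) + 1 = 0 + 2 by ring, innerA_shift i t 0 le_rfl]
      simp [evens, mergeG, ih]

-- A as a fold of mergeG over the per-qubit rows
theorem getA_eq_foldl_merge (circuit : List (List String)) :
    get_hsets circuit
      = ((PySem.List.enumerate circuit).map (fun iq => hrow iq.1 iq.2)).foldl mergeG [] := by
  unfold get_hsets
  rw [List.foldl_map]
  congr 1
  funext nc iq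
  rw [innerA_eval]
  unfold hrow
  rw [List.map_map]
  rfl

def combG {α : Type} (og : Option (List α)) (ps : List α) : Option (List α) :=
  match og, ps with
  | some g, ps => some (g ++ ps)
  | none, [] => none
  | none, ps => some ps

theorem mergeG_get {α : Type} (acc : List (List α)) (r : List α) (k : Nat) :
    (mergeG acc r)[k]? = combG acc[k]? (r[k]?.toList) := by
  induction acc, r using mergeG.induct generalizing k with
  | case1 acc =>
    simp only [mergeG, List.getElem?_nil, Option.toList_none]
    cases acc[k]? <;> simp [combG]
  | case2 p ps ih =>
    cases k with
    | zero => simp [mergeG, combG]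
    | succ k => simpa [mergeG, combG] using ih k
  | case3 g gs p ps ih =>
    cases k with
    | zero => simp [mergeG, combG]
    | succ k => simpa [mergeG] using ih k

theorem mergeG_length {α : Type} (acc : List (List α)) (r : List α) :
    (mergeG acc r).length = Nat.max acc.length r.length := by
  induction acc, r using mergeG.induct with
  | case1 acc => simp [mergeG]
  | case2 p ps ih => simp [mergeG, ih]
  | case3 g gs p ps ih => simp [mergeG, ih]

theorem foldl_mergeG_get {α : Type} (rows : List (List α)) (acc : List (List α)) (k : Nat) :
    (rows.foldl mergeG acc)[k]? = combG acc[k]? (rows.filterMap (fun r => r[k]?)) := by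
  induction rows generalizing acc with
  | nil =>
    simp only [List.foldl_nil, List.filterMap_nil]
    cases acc[k]? <;> simp [combG]
  | cons r rs ih =>
    rw [List.foldl_cons, ih, mergeG_get, List.filterMap_cons]
    cases hg : acc[k]? <;> cases hr : r[k]? <;> simp [combG]

theorem foldl_mergeG_length {α : Type} (rows : List (List α)) (acc : List (List α)) :
    (rows.foldl mergeG acc).length = (rows.map List.length).foldl Nat.max acc.length := by
  induction rows generalizing acc with
  | nil => simp
  | cons r rs ih => simp [ih, mergeG_length]

-- slice with step 2 is evens
theorem slice2_eq_evens {α : Type} (l : List α) :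
    PySem.List.slice? l none none 2 = some (evens l) := by
  have key : ∀ n (l : List α), l.length = n →
      List.filterMap (fun (x : Nat) => l[(2 * (x:Int)).toNat]?)
        (List.range (if 0 < l.length then (((l.length:Int) + 2 - 1) / 2).toNat else 0))
      = evens l := by
    intro n
    induction n using Nat.strong_induction_on with
    | _ n ihn =>
      intro l hl
      match l with
      | [] => simp [evens]
      | [a] =>
        norm_num [evens, List.range_succ, List.filterMap_cons]
      | a :: b :: t =>
        have hcnt : (if 0 < (a :: b :: t).length then ((((a :: b :: t).length:Int) + 2 - 1) / 2).toNat else 0)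
            = (if 0 < t.length then (((t.length:Int) + 2 - 1) / 2).toNat else 0) + 1 := by
          by_cases h : 0 < t.length
          · rw [if_pos (by simp), if_pos h]
            simp only [List.length_cons]
            push_cast
            omega
          · rw [if_pos (by simp), if_neg h]
            have h0 : t.length = 0 := by omega
            simp only [List.length_cons, h0]
            norm_num
        rw [hcnt, List.range_succ_eq_map, List.filterMap_cons]
        norm_num
        have hrec := ihn t.length (by simp [← hl]) t rfl
        rw [show evens (a :: b :: t) = a :: evens t from rfl, ← hrec]
        refine congrArg _ ?_
        apply List.filterMap_congr
        intro k _
        have e1 : (2 * ((k:Int) + 1)).toNat = 2 * k + 2 := by omega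
        have e2 : (2 * ((k : Nat) : Int)).toNat = 2 * k := by omega
        rw [e1, e2]
        simp
  unfold PySem.List.slice?
  rw [if_neg (by norm_num)]
  simp only [PySem.List.sliceIndices]
  norm_num
  exact key l.length l rfl

-- Python max(lengths, default=0) is the Nat fold of max over the lengths
theorem max?_cons_cons (a b : Int) (ls : List Int) :
    PySem.List.max? (a :: b :: ls) id = PySem.List.max? ((if a < b then b else a) :: ls) id := by
  unfold PySem.List.max?
  simp only [List.foldl_cons, id_eq]
  by_cases h : a < b <;> simp [h]

theorem max?_cons_nat (m : Nat) (ls : List Nat) :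
    PySem.List.max? ((m :: ls).map (fun (n : Nat) => (n : Int))) id
      = some ((ls.foldl Nat.max m : Nat) : Int) := by
  induction ls generalizing m with
  | nil => simp [PySem.List.max?]
  | cons n ns ih =>
    rw [List.map_cons, List.map_cons, max?_cons_cons]
    have hmax : (if (m : Int) < (n : Int) then (n : Int) else (m : Int)) = ((Nat.max m n : Nat) : Int) := by
      split_ifs with h
      · have hle : m ≤ n := by exact_mod_cast h.le
        exact_mod_cast (Nat.max_eq_right hle).symm
      · have hle : n ≤ m := by exact_mod_cast not_lt.mp h
        exact_mod_cast (Nat.max_eq_left hle).symm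
    rw [hmax, show ((Nat.max m n : Nat) : Int) :: ns.map (fun (n : Nat) => (n : Int))
          = ((Nat.max m n :: ns).map (fun (n : Nat) => (n : Int))) from rfl,
        ih (Nat.max m n), List.foldl_cons]

theorem maxD_lengths (rows : List (List (Int × Int))) :
    PySem.List.maxD (rows.map (fun row => (row.length : Int))) id 0
      = (((rows.map List.length).foldl Nat.max 0 : Nat) : Int) := by
  cases rows with
  | nil => simp [PySem.List.maxD, PySem.List.max?]
  | cons r rs =>
    unfold PySem.List.maxD
    rw [show ((r :: rs).map (fun row => (row.length : Int)))
          = ((r :: rs).map List.length).map (fun (n : Nat) => (n : Int)) from by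
        rw [List.map_map]; rfl,
      List.map_cons, max?_cons_nat, List.foldl_cons]
    simp

-- one output group of B is the filterMap of the k-th entries
theorem group_eq_filterMap (rows : List (List (Int × Int))) (k : Nat) :
    (rows.filter (fun row => decide (((k : Nat) : Int) < (row.length : Int)))).map
        (fun row => PySem.List.pyGetD row (k : Int) (0, 0))
      = rows.filterMap (fun r => r[k]?) := by
  induction rows with
  | nil => simp
  | cons r rs ih =>
    rw [List.filter_cons, List.filterMap_cons]
    by_cases h : k < r.length
    · rw [if_pos (by simpa using h)]
      rw [List.map_cons, ih, List.getElem?_eq_getElem h]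
      congr 1
      rw [PySem.List.pyGetD_natCast]
      exact List.getD_eq_getElem r (0, 0) h
    · rw [if_neg (by simpa using h), List.getElem?_eq_none (by omega), ih]

theorem get_hsets_spec : Claim_equal_get_hsets := by
  intro circuit _
  unfold Spec_get_hsets
  -- abbreviations
  set rows : List (List (Int × Int)) :=
    (PySem.List.enumerate circuit).map (fun iq => hrow iq.1 iq.2) with hrows
  set D : Nat := (rows.map List.length).foldl Nat.max 0 with hD
  -- A as a fold of mergeG
  have hA : get_hsets circuit = rows.foldl mergeG [] := by
    rw [getA_eq_foldl_merge]
  have hAlen : (get_hsets circuit).length = D := by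
    rw [hA, foldl_mergeG_length]
    rfl
  -- B as a map over range D
  have hB : get_hsets_alt circuit
      = (List.range D).map (fun k => rows.filterMap (fun r => r[k]?)) := by
    unfold get_hsets_alt
    have hper : (PySem.List.enumerate circuit).map (fun iq =>
        (PySem.List.slice? (((PySem.List.enumerate iq.2).filter (fun cg => cg.2 == "H")).map
          (fun cg => (iq.1, cg.1))) none none 2).getD []) = rows := by
      simp only [slice2_eq_evens, Option.getD_some, hrows, hrow]
    simp only [hper]
    rw [show rows.map (fun row => ((row.length : Nat) : Int)) = rows.map (fun row => (row.length : Int)) from rfl]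
    rw [maxD_lengths, ← hD, PySem.List.pyRange_one]
    rw [show ((D : Int) - 0).toNat = D by omega]
    rw [List.map_map]
    apply List.map_congr_left
    intro k _
    simp only [Function.comp_apply, zero_add]
    exact group_eq_filterMap rows k
  -- pointwise equality
  apply List.ext_getElem?
  intro k
  have hBk : (get_hsets_alt circuit)[k]? =
      if k < D then some (rows.filterMap (fun r => r[k]?)) else none := by
    rw [hB, List.getElem?_map]
    by_cases hk : k < D
    · rw [List.getElem?_range hk, if_pos hk]
      rfl
    · rw [if_neg hk, show (List.range D)[k]? = none from by simp; omega]
      rfl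
  rw [hBk]
  by_cases hk : k < D
  · rw [if_pos hk]
    have hlt : k < (get_hsets circuit).length := by rw [hAlen]; exact hk
    have hsome : (get_hsets circuit)[k]?.isSome := by
      simp [List.getElem?_eq_getElem hlt]
    rw [hA, foldl_mergeG_get] at hsome ⊢
    simp only [List.getElem?_nil] at hsome ⊢
    cases hps : rows.filterMap (fun r => r[k]?) with
    | nil => rw [hps] at hsome; simp [combG] at hsome
    | cons p ps => simp [combG]
  · rw [if_neg hk]
    apply List.getElem?_eq_none
    rw [hAlen]
    omega
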